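-- pv_equiv track=rewrite | github.com/F1gueron/Design-and-Analysis-of-Algorithms | Juez/Segunda entrega/RAC.py | isSol
-- ===== SOURCE A (Python) =====
-- def isSol(disponible, mejor_tiempo):
--     tiempo_libre = 0
--     for i in range(len(disponible)):
--         if disponible[i]:
--             tiempo_libre += 1
--             if tiempo_libre >= mejor_tiempo:
--                 return True
--         else:
--             tiempo_libre = 0
--     return False
-- ===== SOURCE B (Python) =====
-- def isSol(disponible, mejor_tiempo):
--     # Two-phase: collect the lengths of all maximal runs of truthy values,
--     # then test whether any run reaches the threshold.
--     runs = []
--     n = 0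
--     for x in disponible:
--         if x:
--             n += 1
--         else:
--             if n:
--                 runs.append(n)
--             n = 0
--     if n:
--         runs.append(n)
--     return any(r >= mejor_tiempo for r in runs)
-- ===== Notes on version B (the rewrite author's own statement) =====
-- stated objective: alternative
-- what changed: Replaces the running-counter loop with early return by a build-runs-then-test decomposition: first collect the lengths of all maximal True runs, then check whether any run meets the threshold.
import Mathlib
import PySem

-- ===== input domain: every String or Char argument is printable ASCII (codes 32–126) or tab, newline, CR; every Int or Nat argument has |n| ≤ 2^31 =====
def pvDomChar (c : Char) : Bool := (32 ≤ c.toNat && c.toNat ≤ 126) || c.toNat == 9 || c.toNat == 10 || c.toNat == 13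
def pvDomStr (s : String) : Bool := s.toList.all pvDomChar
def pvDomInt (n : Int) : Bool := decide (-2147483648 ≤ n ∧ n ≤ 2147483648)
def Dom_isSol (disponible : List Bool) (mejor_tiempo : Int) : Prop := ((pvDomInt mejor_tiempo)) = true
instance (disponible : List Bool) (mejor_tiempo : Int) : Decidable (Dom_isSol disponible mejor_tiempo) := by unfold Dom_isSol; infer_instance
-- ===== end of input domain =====

-- B replaces A's running-counter loop (with early return) by a build-all-run-lengths-then-test
-- decomposition; same O(n) cost, different structure (objective: alternative).


-- ===== PORT A =====
-- loop over the elements keeping the running counter tiempo_libre; early return True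
def isSolAux (mejor_tiempo : Int) : List Bool → Int → Bool
  | [], _ => false
  | b :: rest, tiempo_libre =>
    if b then
      if mejor_tiempo ≤ tiempo_libre + 1 then true
      else isSolAux mejor_tiempo rest (tiempo_libre + 1)
    else isSolAux mejor_tiempo rest 0

def isSol (disponible : List Bool) (mejor_tiempo : Int) : Bool :=
  isSolAux mejor_tiempo disponible 0

-- ===== PORT B =====
-- phase 1: the lengths of all maximal truthy runs (n = current run length)
def pvRuns : List Bool → Int → List Int
  | [], n => if n ≠ 0 then [n] else []
  | b :: rest, n =>
    if b then pvRuns rest (n + 1)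
    else if n ≠ 0 then n :: pvRuns rest 0 else pvRuns rest 0

-- phase 2: any run reaches the threshold
def isSol_alt (disponible : List Bool) (mejor_tiempo : Int) : Bool :=
  (pvRuns disponible 0).any (fun r => mejor_tiempo ≤ r)

-- ===== PRECONDITION & SPEC =====
def Spec_isSol (disponible : List Bool) (mejor_tiempo : Int) (out : Bool) : Prop := out = isSol_alt disponible mejor_tiempo
instance (disponible : List Bool) (mejor_tiempo : Int) (out : Bool) : Decidable (Spec_isSol disponible mejor_tiempo out) := by unfold Spec_isSol; infer_instance

-- ===== CLAIM (what is proved, stated in full; the proofs are below) =====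
def Claim_equal_isSol : Prop := ∀ (disponible : List Bool) (mejor_tiempo : Int), Dom_isSol disponible mejor_tiempo → Spec_isSol disponible mejor_tiempo (isSol disponible mejor_tiempo)

-- ===== LEMMAS AND PROOFS =====

-- if the pending run is already long enough, some produced run is long enough
theorem pvRuns_any_of_ge (mt : Int) (d : List Bool) (t : Int) (ht : 0 < t) (hge : mt ≤ t) :
    (pvRuns d t).any (fun r => mt ≤ r) = true := by
  induction d generalizing t with
  | nil =>
    unfold pvRuns
    rw [if_pos (by omega : t ≠ 0)]
    simpa using hge
  | cons b rest ih =>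
    cases b with
    | true => exact ih (t + 1) (by omega) (by omega)
    | false =>
      unfold pvRuns
      simp only [Bool.false_eq_true, if_false]
      rw [if_pos (by omega : t ≠ 0)]
      simp only [List.any_cons, Bool.or_eq_true, decide_eq_true_eq]
      exact Or.inl hge

-- loop invariant relating A's counter loop to B's run list, for admissible counter states
theorem isSolAux_eq_runs (mt : Int) (d : List Bool) (t : Int)
    (h : t = 0 ∨ (0 < t ∧ t < mt)) :
    isSolAux mt d t = (pvRuns d t).any (fun r => mt ≤ r) := by
  induction d generalizing t with
  | nil =>
    unfold isSolAux pvRuns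
    rcases h with h | h
    · simp [h]
    · rw [if_pos (by omega : t ≠ 0)]
      simp only [List.any_cons, List.any_nil, Bool.or_false]
      simp only [decide_eq_false (by omega : ¬ mt ≤ t)]
  | cons b rest ih =>
    cases b with
    | true =>
      unfold isSolAux pvRuns
      simp only [if_true]
      by_cases hc : mt ≤ t + 1
      · rw [if_pos hc, pvRuns_any_of_ge mt rest (t + 1) (by omega) hc]
      · rw [if_neg hc, ih (t + 1) (by omega)]
    | false =>
      unfold isSolAux pvRuns
      simp only [Bool.false_eq_true, if_false]
      rcases h with h | h
      · rw [if_neg (by omega : ¬ t ≠ 0), ih 0 (Or.inl rfl)]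
      · rw [if_pos (by omega : t ≠ 0), ih 0 (Or.inl rfl)]
        simp only [List.any_cons, decide_eq_false (by omega : ¬ mt ≤ t), Bool.false_or]

-- ===== VERDICT (by name: the statement is the Claim_ definition above) =====
theorem isSol_spec : Claim_equal_isSol := by
  intro d mt _
  unfold Spec_isSol isSol isSol_alt
  exact isSolAux_eq_runs mt d 0 (Or.inl rfl)
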